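-- pv_equiv track=rewrite | github.com/Taha-Khurram/Final_Year_Project | app/agents/humanize_agent.py | _try_split_sentence
-- ===== SOURCE A (Python) =====
-- def _try_split_sentence(sentence):
--     """Try to split a long sentence at a conjunction or comma near the middle."""
--     words = sentence.split()
--     mid = len(words) // 2
--     search_range = range(max(mid - 3, 2), min(mid + 4, len(words) - 1))
--
--     split_words = {'and', 'but', 'which', 'that', 'because', 'while', 'so', 'yet', 'although', 'however'}
--
--     # Try to find a conjunction near the middle
--     for i in search_range:
--         if words[i].lower().rstrip(',') in split_words:
--             first_half = ' '.join(words[:i])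
--             second_half = ' '.join(words[i:])
--
--             # Clean up first half — add period if needed
--             if not first_half.endswith(('.', '!', '?')):
--                 first_half = first_half.rstrip(',') + '.'
--
--             # Capitalize second half
--             if second_half and second_half[0].islower():
--                 second_half = second_half[0].upper() + second_half[1:]
--
--             return [first_half, second_half]
--
--     # Try comma near the middle
--     for i in search_range:
--         if words[i].endswith(','):
--             first_half = ' '.join(words[:i + 1]).rstrip(',') + '.'
--             second_half = ' '.join(words[i + 1:])
--             if second_half and second_half[0].islower():
--                 second_half = second_half[0].upper() + second_half[1:]
--             return [first_half, second_half]
--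
--     # No good split point — return as-is
--     return [sentence]
-- ===== SOURCE B (Python) =====
-- def _cap(s):
--     """Capitalize the first character if it is a lowercase letter."""
--     if s and s[0].islower():
--         return s[0].upper() + s[1:]
--     return s
--
--
-- def _try_split_sentence(sentence):
--     """Try to split a long sentence at a conjunction or comma near the middle."""
--     words = sentence.split()
--     n = len(words)
--     lo = max(n // 2 - 3, 2)
--     hi = min(n // 2 + 4, n - 1)
--     split_words = {'and', 'but', 'which', 'that', 'because', 'while', 'so', 'yet', 'although', 'however'}
--
--     conj_i = None
--     comma_i = None
--     for i in range(lo, hi):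
--         w = words[i]
--         if w.lower().rstrip(',') in split_words:
--             conj_i = i
--             break  # a conjunction wins outright, nothing later matters
--         if comma_i is None and w.endswith(','):
--             comma_i = i
--
--     if conj_i is not None:
--         first = ' '.join(words[:conj_i])
--         if not first.endswith(('.', '!', '?')):
--             first = first.rstrip(',') + '.'
--         return [first, _cap(' '.join(words[conj_i:]))]
--     if comma_i is not None:
--         first = ' '.join(words[:comma_i + 1]).rstrip(',') + '.'
--         return [first, _cap(' '.join(words[comma_i + 1:]))]
--     return [sentence]
-- ===== Notes on version B (the rewrite author's own statement) =====
-- stated objective: alternative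
-- what changed: Replaces A's two separate scans of the middle window (one for a conjunction, then a second full scan for a comma) by a single fused scan that breaks at the first conjunction while recording the first comma, with the two split styles built afterwards in a shared helper.
import Mathlib
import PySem

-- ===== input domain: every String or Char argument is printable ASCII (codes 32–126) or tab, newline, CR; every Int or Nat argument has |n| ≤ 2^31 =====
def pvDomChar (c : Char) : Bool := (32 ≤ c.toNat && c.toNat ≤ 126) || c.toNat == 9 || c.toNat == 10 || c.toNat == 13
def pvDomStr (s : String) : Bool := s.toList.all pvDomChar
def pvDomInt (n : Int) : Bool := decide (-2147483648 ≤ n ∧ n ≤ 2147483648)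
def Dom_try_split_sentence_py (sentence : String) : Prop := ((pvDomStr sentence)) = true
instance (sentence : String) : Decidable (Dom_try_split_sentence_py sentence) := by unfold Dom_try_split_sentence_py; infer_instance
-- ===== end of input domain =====

-- B fuses A's two scans of the middle window into one scan (break at first conjunction,
-- record first comma) and builds the split afterwards; alternative decomposition, same cost.

-- exact port of Python's str.rstrip(',') (strip the single character ',' from the right)
def pyRstripComma (s : String) : String :=
  String.ofList ((s.toList.reverse.dropWhile (fun c => c == ',')).reverse)

-- string concatenation done on the character lists (kernel-transparent; exact for Python +)
def strCat (a b : String) : String := String.ofList (a.toList ++ b.toList)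

-- ===== PORT A =====
-- first for-loop of A: return [first_half, second_half] at the first conjunction hit
def loopConjA (words : List String) (sw : PySem.Set String) : List Int → Option (List String)
  | [] => none
  | i :: rest =>
    -- words[i]; every i the range produces is in bounds, so the default is unreachable
    let w := (PySem.List.pyGet? words i).getD ""
    if decide (pyRstripComma (PySem.Str.lower w) ∈ sw) then
      let first_half := PySem.Str.join " " (PySem.List.slice words none (some i))
      let second_half := PySem.Str.join " " (PySem.List.slice words (some i) none)
      let first_half :=
        if !(PySem.Str.endswith first_half "." || PySem.Str.endswith first_half "!" ||
             PySem.Str.endswith first_half "?") then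
          strCat (pyRstripComma first_half) "."
        else first_half
      let second_half :=
        match second_half.toList with
        | [] => second_half
        | c :: cs => if PySem.Chars.islower c then String.ofList (PySem.Chars.upperChar c :: cs)
                     else second_half
      some [first_half, second_half]
    else loopConjA words sw rest

-- second for-loop of A: return the comma-style split at the first word ending in ','
def loopCommaA (words : List String) : List Int → Option (List String)
  | [] => none
  | i :: rest =>
    let w := (PySem.List.pyGet? words i).getD ""
    if PySem.Str.endswith w "," then
      let first_half :=
        strCat (pyRstripComma (PySem.Str.join " " (PySem.List.slice words none (some (i + 1))))) "."
      let second_half := PySem.Str.join " " (PySem.List.slice words (some (i + 1)) none)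
      let second_half :=
        match second_half.toList with
        | [] => second_half
        | c :: cs => if PySem.Chars.islower c then String.ofList (PySem.Chars.upperChar c :: cs)
                     else second_half
      some [first_half, second_half]
    else loopCommaA words rest

def try_split_sentence_py (sentence : String) : List String :=
  let words := PySem.Str.split₀ sentence
  let mid := PySem.Int.floordiv (words.length : Int) 2
  let search_range := PySem.List.pyRange (max (mid - 3) 2) (min (mid + 4) ((words.length : Int) - 1)) 1
  let split_words : PySem.Set String :=
    PySem.Set.ofList ["and", "but", "which", "that", "because", "while", "so", "yet", "although", "however"]
  match loopConjA words split_words search_range with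
  | some r => r
  | none =>
    match loopCommaA words search_range with
    | some r => r
    | none => [sentence]

-- ===== PORT B =====
-- _cap from Source B
def capB (s : String) : String :=
  match s.toList with
  | [] => s
  | c :: cs => if PySem.Chars.islower c then String.ofList (PySem.Chars.upperChar c :: cs) else s

-- the conjunction-style split, built after the scan
def buildConjB (words : List String) (i : Int) : List String :=
  let first := PySem.Str.join " " (PySem.List.slice words none (some i))
  let first :=
    if !(PySem.Str.endswith first "." || PySem.Str.endswith first "!" ||
         PySem.Str.endswith first "?") then
      strCat (pyRstripComma first) "."
    else first
  [first, capB (PySem.Str.join " " (PySem.List.slice words (some i) none))]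

-- the comma-style split, built after the scan
def buildCommaB (words : List String) (i : Int) : List String :=
  [strCat (pyRstripComma (PySem.Str.join " " (PySem.List.slice words none (some (i + 1))))) ".",
   capB (PySem.Str.join " " (PySem.List.slice words (some (i + 1)) none))]

-- Source B's single fused scan: break at the first conjunction, record the first comma
def scanB (words : List String) (sw : PySem.Set String) (comma? : Option Int) :
    List Int → Option Int × Option Int
  | [] => (none, comma?)
  | i :: rest =>
    let w := (PySem.List.pyGet? words i).getD ""
    if decide (pyRstripComma (PySem.Str.lower w) ∈ sw) then (some i, comma?)
    else
      scanB words sw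
        (if comma?.isNone && PySem.Str.endswith w "," then some i else comma?) rest

def try_split_sentence_py_alt (sentence : String) : List String :=
  let words := PySem.Str.split₀ sentence
  let n : Int := (words.length : Int)
  let sw : PySem.Set String :=
    PySem.Set.ofList ["and", "but", "which", "that", "because", "while", "so", "yet", "although", "however"]
  match scanB words sw none (PySem.List.pyRange (max (PySem.Int.floordiv n 2 - 3) 2) (min (PySem.Int.floordiv n 2 + 4) (n - 1)) 1) with
  | (some i, _) => buildConjB words i
  | (none, some j) => buildCommaB words j
  | (none, none) => [sentence]

-- ===== PRECONDITION & SPEC =====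
def Spec_try_split_sentence_py (sentence : String) (out : List String) : Prop := out = try_split_sentence_py_alt sentence
instance (sentence : String) (out : List String) : Decidable (Spec_try_split_sentence_py sentence out) := by unfold Spec_try_split_sentence_py; infer_instance

-- ===== CLAIM (what is proved, stated in full; the proofs are below) =====
def Claim_equal_try_split_sentence_py : Prop := ∀ (sentence : String), Dom_try_split_sentence_py sentence → Spec_try_split_sentence_py sentence (try_split_sentence_py sentence)

-- ===== LEMMAS AND PROOFS =====

-- first index in the list satisfying p (proof-side characterisation of both scans)
def findFirst (p : Int → Bool) : List Int → Option Int
  | [] => none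
  | i :: rest => if p i then some i else findFirst p rest

def condConj (words : List String) (sw : PySem.Set String) (i : Int) : Bool :=
  decide (pyRstripComma (PySem.Str.lower ((PySem.List.pyGet? words i).getD "")) ∈ sw)

def condComma (words : List String) (i : Int) : Bool :=
  PySem.Str.endswith ((PySem.List.pyGet? words i).getD "") ","

theorem loopConjA_eq (words : List String) (sw : PySem.Set String) (l : List Int) :
    loopConjA words sw l = (findFirst (condConj words sw) l).map (buildConjB words) := by
  induction l with
  | nil => rfl
  | cons i rest ih =>
    simp only [loopConjA, findFirst, condConj]
    split
    · rfl
    · exact ih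

theorem loopCommaA_eq (words : List String) (l : List Int) :
    loopCommaA words l = (findFirst (condComma words) l).map (buildCommaB words) := by
  induction l with
  | nil => rfl
  | cons i rest ih =>
    simp only [loopCommaA, findFirst, condComma]
    split
    · rfl
    · exact ih

theorem scanB_fst (words : List String) (sw : PySem.Set String) (c? : Option Int) (l : List Int) :
    (scanB words sw c? l).1 = findFirst (condConj words sw) l := by
  induction l generalizing c? with
  | nil => rfl
  | cons i rest ih =>
    simp only [scanB, findFirst, condConj]
    split
    · rfl
    · exact ih _

theorem scanB_snd (words : List String) (sw : PySem.Set String) (c? : Option Int) (l : List Int)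
    (h : findFirst (condConj words sw) l = none) :
    (scanB words sw c? l).2 = (c?.or (findFirst (condComma words) l)) := by
  induction l generalizing c? with
  | nil => cases c? <;> rfl
  | cons i rest ih =>
    simp only [findFirst, condConj] at h
    simp only [scanB]
    split
    · simp_all
    · rw [if_neg (by assumption)] at h
      rw [ih _ h]
      simp only [findFirst, condComma]
      cases c? with
      | some j => simp
      | none =>
        simp only [Option.isNone_none, Bool.true_and, PySem.Str.endswith_eq]
        split <;> simp_all

theorem try_split_sentence_py_eq_alt (sentence : String) :
    try_split_sentence_py sentence = try_split_sentence_py_alt sentence := by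
  unfold try_split_sentence_py try_split_sentence_py_alt
  simp only [loopConjA_eq, loopCommaA_eq]
  generalize PySem.Str.split₀ sentence = words
  generalize (PySem.Set.ofList _ : PySem.Set String) = sw
  generalize PySem.List.pyRange _ _ 1 = r
  have h1 := scanB_fst words sw none r
  rcases hp : scanB words sw none r with ⟨a, b⟩
  rw [hp] at h1
  simp only at h1
  cases hc : findFirst (condConj words sw) r with
  | some i =>
    rw [hc] at h1; subst h1
    simp
  | none =>
    rw [hc] at h1; subst h1
    have h2 := scanB_snd words sw none r hc
    rw [hp] at h2
    simp only [Option.none_or] at h2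
    subst h2
    cases hk : findFirst (condComma words) r <;> simp

-- ===== VERDICT (by name: the statement is the Claim_ definition above) =====
theorem try_split_sentence_py_spec : Claim_equal_try_split_sentence_py := by
  intro sentence _
  exact try_split_sentence_py_eq_alt sentence
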